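-- pv_equiv track=rewrite | github.com/ByteBard97/vuemorphic | src/vuemorphic/skeleton/imports.py | build_shadcn_import_lines
-- ===== SOURCE A (Python) =====
-- SHADCN_COMPONENT_MAP: dict[str, str] = {
--     "Button":       "@/components/ui/button",
--     "Input":        "@/components/ui/input",
--     "Textarea":     "@/components/ui/textarea",
--     "Select":       "@/components/ui/select",
--     "Checkbox":     "@/components/ui/checkbox",
--     "Switch":       "@/components/ui/switch",
--     "Slider":       "@/components/ui/slider",
--     "Label":        "@/components/ui/label",
--     "Card":         "@/components/ui/card",
--     "CardHeader":   "@/components/ui/card",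
--     "CardContent":  "@/components/ui/card",
--     "CardFooter":   "@/components/ui/card",
--     "Dialog":       "@/components/ui/dialog",
--     "Sheet":        "@/components/ui/sheet",
--     "Popover":      "@/components/ui/popover",
--     "Tooltip":      "@/components/ui/tooltip",
--     "Badge":        "@/components/ui/badge",
--     "Separator":    "@/components/ui/separator",
--     "ScrollArea":   "@/components/ui/scroll-area",
--     "Tabs":         "@/components/ui/tabs",
--     "TabsList":     "@/components/ui/tabs",
--     "TabsTrigger":  "@/components/ui/tabs",
--     "TabsContent":  "@/components/ui/tabs",
--     "DropdownMenu": "@/components/ui/dropdown-menu",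
--     "Avatar":       "@/components/ui/avatar",
--     "Progress":     "@/components/ui/progress",
--     "Skeleton":     "@/components/ui/skeleton",
--     "Table":        "@/components/ui/table",
--     "Toast":        "@/components/ui/toast",
--     "Alert":        "@/components/ui/alert",
--     "Command":      "@/components/ui/command",
-- }
--
-- def build_shadcn_import_lines(shadcn_names: list[str]) -> list[str]:
--     """Generate per-path import lines for shadcn-vue components."""
--     by_path: dict[str, list[str]] = {}
--     for name in shadcn_names:
--         path = SHADCN_COMPONENT_MAP.get(name, f"@/components/ui/{name.lower()}")
--         by_path.setdefault(path, []).append(name)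
--     lines = []
--     for path, names in sorted(by_path.items()):
--         names_str = ", ".join(sorted(names))
--         lines.append(f"import {{ {names_str} }} from '{path}'")
--     return lines
-- ===== SOURCE B (Python) =====
-- # Derives each import path from the name itself: lowercase, with a small table of
-- # the few components whose path is not just their lowercased name.
-- _SPECIAL_SUFFIX: dict[str, str] = {
--     "CardHeader":   "card",
--     "CardContent":  "card",
--     "CardFooter":   "card",
--     "ScrollArea":   "scroll-area",
--     "TabsList":     "tabs",
--     "TabsTrigger":  "tabs",
--     "TabsContent":  "tabs",
--     "DropdownMenu": "dropdown-menu",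
-- }
--
--
-- def build_shadcn_import_lines(shadcn_names: list[str]) -> list[str]:
--     """Generate per-path import lines for shadcn-vue components."""
--     def path_of(name: str) -> str:
--         return "@/components/ui/" + _SPECIAL_SUFFIX.get(name, name.lower())
--
--     pairs = sorted((path_of(name), name) for name in shadcn_names)
--     lines = []
--     i = 0
--     while i < len(pairs):
--         path = pairs[i][0]
--         j = i
--         names = []
--         while j < len(pairs) and pairs[j][0] == path:
--             names.append(pairs[j][1])
--             j += 1
--         lines.append(f"import {{ {', '.join(names)} }} from '{path}'")
--         i = j
--     return lines
-- ===== Notes on version B (the rewrite author's own statement) =====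
-- stated objective: alternative
-- what changed: B drops A's 31-entry path map and mutable grouping dict: it derives each path as lowercase-plus-an-8-entry-exception-table, sorts the (path, name) pairs once globally, and emits the lines in one linear grouping scan over the sorted pairs instead of A's dict-group-then-per-group-sort.
import Mathlib
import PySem

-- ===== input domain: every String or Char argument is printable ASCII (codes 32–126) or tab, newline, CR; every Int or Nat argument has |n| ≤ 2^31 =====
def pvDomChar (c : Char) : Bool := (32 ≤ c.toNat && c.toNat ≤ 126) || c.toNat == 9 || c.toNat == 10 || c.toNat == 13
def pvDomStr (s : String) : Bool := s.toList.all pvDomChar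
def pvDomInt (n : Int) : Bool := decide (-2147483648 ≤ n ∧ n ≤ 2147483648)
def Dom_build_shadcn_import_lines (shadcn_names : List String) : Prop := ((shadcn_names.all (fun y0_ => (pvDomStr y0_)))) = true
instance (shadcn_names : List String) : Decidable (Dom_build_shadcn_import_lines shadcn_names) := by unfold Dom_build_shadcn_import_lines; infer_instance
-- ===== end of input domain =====

-- B derives each path from the name itself (lowercase plus a small table of the 8
-- irregular suffixes, equal to A's 31-entry path map on every string), sorts the
-- (path, name) pairs ONCE globally and emits the lines in a single linear grouping
-- scan over the sorted pairs, instead of A's mutable grouping dict with per-group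
-- sorts; objective: alternative (different decomposition at the same O(n log n) cost).

-- ===== PORT A =====
-- module constant SHADCN_COMPONENT_MAP (used by A, as in the Python module)
def SHADCN_COMPONENT_MAP : PySem.Dict String String := PySem.Dict.ofList [
  ("Button", "@/components/ui/button"),
  ("Input", "@/components/ui/input"),
  ("Textarea", "@/components/ui/textarea"),
  ("Select", "@/components/ui/select"),
  ("Checkbox", "@/components/ui/checkbox"),
  ("Switch", "@/components/ui/switch"),
  ("Slider", "@/components/ui/slider"),
  ("Label", "@/components/ui/label"),
  ("Card", "@/components/ui/card"),
  ("CardHeader", "@/components/ui/card"),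
  ("CardContent", "@/components/ui/card"),
  ("CardFooter", "@/components/ui/card"),
  ("Dialog", "@/components/ui/dialog"),
  ("Sheet", "@/components/ui/sheet"),
  ("Popover", "@/components/ui/popover"),
  ("Tooltip", "@/components/ui/tooltip"),
  ("Badge", "@/components/ui/badge"),
  ("Separator", "@/components/ui/separator"),
  ("ScrollArea", "@/components/ui/scroll-area"),
  ("Tabs", "@/components/ui/tabs"),
  ("TabsList", "@/components/ui/tabs"),
  ("TabsTrigger", "@/components/ui/tabs"),
  ("TabsContent", "@/components/ui/tabs"),
  ("DropdownMenu", "@/components/ui/dropdown-menu"),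
  ("Avatar", "@/components/ui/avatar"),
  ("Progress", "@/components/ui/progress"),
  ("Skeleton", "@/components/ui/skeleton"),
  ("Table", "@/components/ui/table"),
  ("Toast", "@/components/ui/toast"),
  ("Alert", "@/components/ui/alert"),
  ("Command", "@/components/ui/command")]

-- port of A: a dict 'by_path' built by setdefault(path, []).append(name) —
-- i.e. by_path[path] = by_path.get(path, []) + [name], which is Dict.modify —
-- then a loop over sorted(by_path.items()) appending the formatted lines.
-- (dict keys are distinct, so Python's tuple comparison in sorted(by_path.items())
-- never reaches the second component: sorting by the key alone is exact here.)
def build_shadcn_import_lines (shadcn_names : List String) : List String :=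
  let by_path : PySem.Dict String (List String) :=
    shadcn_names.foldl (fun d name =>
      d.modify (SHADCN_COMPONENT_MAP.getD name ("@/components/ui/" ++ PySem.Str.lower name))
        [] (fun v => v ++ [name])) PySem.Dict.empty
  (PySem.List.sorted by_path.items (fun p => p.1) false).foldl (fun lines p =>
    lines ++ ["import { " ++ PySem.Str.join ", " (PySem.List.sorted p.2 (fun x => x) false)
              ++ " } from '" ++ p.1 ++ "'"]) []

-- ===== PORT B =====
-- B's small table _SPECIAL_SUFFIX: only the components whose path suffix is not
-- their lowercased name.
def SHADCN_SPECIAL_SUFFIX : PySem.Dict String String := PySem.Dict.ofList [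
  ("CardHeader", "card"),
  ("CardContent", "card"),
  ("CardFooter", "card"),
  ("ScrollArea", "scroll-area"),
  ("TabsList", "tabs"),
  ("TabsTrigger", "tabs"),
  ("TabsContent", "tabs"),
  ("DropdownMenu", "dropdown-menu")]

-- Source B's local helper path_of
def pv_path_of_alt (name : String) : String :=
  "@/components/ui/" ++ SHADCN_SPECIAL_SUFFIX.getD name (PySem.Str.lower name)

-- Source B's f-string for one output line
def pv_mkLine (path : String) (names : List String) : String :=
  "import { " ++ PySem.Str.join ", " names ++ " } from '" ++ path ++ "'"

-- Source B's outer while loop: the inner while collects the run of pairs sharing the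
-- head's path (takeWhile) and i jumps past it (dropWhile)
def pvGroupLines (pairs : List (String × String)) : List String :=
  match pairs with
  | [] => []
  | (path, name) :: rest =>
    pv_mkLine path (name :: (rest.takeWhile (fun q => q.1 == path)).map Prod.snd)
      :: pvGroupLines (rest.dropWhile (fun q => q.1 == path))
termination_by pairs.length
decreasing_by
  have := List.length_dropWhile_le (fun q => q.1 == path) rest
  simp; omega

-- port of B: one global sort of the (path, name) pairs (Python's tuple sort =
-- sorted2 with the two components as keys), then the linear grouping scan.
def build_shadcn_import_lines_alt (shadcn_names : List String) : List String :=
  pvGroupLines (PySem.List.sorted2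
    (shadcn_names.map (fun name => (pv_path_of_alt name, name))) Prod.fst Prod.snd false)

-- ===== PRECONDITION & SPEC =====
def Spec_build_shadcn_import_lines (shadcn_names : List String) (out : List String) : Prop := out = build_shadcn_import_lines_alt shadcn_names
instance (shadcn_names : List String) (out : List String) : Decidable (Spec_build_shadcn_import_lines shadcn_names out) := by unfold Spec_build_shadcn_import_lines; infer_instance

-- ===== CLAIM (what is proved, stated in full; the proofs are below) =====
def Claim_equal_build_shadcn_import_lines : Prop := ∀ (shadcn_names : List String), Dom_build_shadcn_import_lines shadcn_names → Spec_build_shadcn_import_lines shadcn_names (build_shadcn_import_lines shadcn_names)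

-- ===== LEMMAS AND PROOFS =====

-- A's lookup with its lowercase fallback and B's lowercase-with-exceptions rule give
-- the same path for EVERY string (checked key by key; off the 31 keys both fall back)
theorem pv_path_of_eq (name : String) :
    SHADCN_COMPONENT_MAP.getD name ("@/components/ui/" ++ PySem.Str.lower name)
      = pv_path_of_alt name := by
  unfold pv_path_of_alt
  by_cases h0 : name = "Button"
  · subst h0; decide
  by_cases h1 : name = "Input"
  · subst h1; decide
  by_cases h2 : name = "Textarea"
  · subst h2; decide
  by_cases h3 : name = "Select"
  · subst h3; decide
  by_cases h4 : name = "Checkbox"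
  · subst h4; decide
  by_cases h5 : name = "Switch"
  · subst h5; decide
  by_cases h6 : name = "Slider"
  · subst h6; decide
  by_cases h7 : name = "Label"
  · subst h7; decide
  by_cases h8 : name = "Card"
  · subst h8; decide
  by_cases h9 : name = "CardHeader"
  · subst h9; decide
  by_cases h10 : name = "CardContent"
  · subst h10; decide
  by_cases h11 : name = "CardFooter"
  · subst h11; decide
  by_cases h12 : name = "Dialog"
  · subst h12; decide
  by_cases h13 : name = "Sheet"
  · subst h13; decide
  by_cases h14 : name = "Popover"
  · subst h14; decide
  by_cases h15 : name = "Tooltip"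
  · subst h15; decide
  by_cases h16 : name = "Badge"
  · subst h16; decide
  by_cases h17 : name = "Separator"
  · subst h17; decide
  by_cases h18 : name = "ScrollArea"
  · subst h18; decide
  by_cases h19 : name = "Tabs"
  · subst h19; decide
  by_cases h20 : name = "TabsList"
  · subst h20; decide
  by_cases h21 : name = "TabsTrigger"
  · subst h21; decide
  by_cases h22 : name = "TabsContent"
  · subst h22; decide
  by_cases h23 : name = "DropdownMenu"
  · subst h23; decide
  by_cases h24 : name = "Avatar"
  · subst h24; decide
  by_cases h25 : name = "Progress"
  · subst h25; decide
  by_cases h26 : name = "Skeleton"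
  · subst h26; decide
  by_cases h27 : name = "Table"
  · subst h27; decide
  by_cases h28 : name = "Toast"
  · subst h28; decide
  by_cases h29 : name = "Alert"
  · subst h29; decide
  by_cases h30 : name = "Command"
  · subst h30; decide
  · rw [PySem.Dict.getD_of_not_contains, PySem.Dict.getD_of_not_contains]
    · simp [SHADCN_SPECIAL_SUFFIX, PySem.Dict.ofList, PySem.Dict.update,
        PySem.Dict.contains_insert, PySem.Dict.contains_empty, h9, h10, h11, h18, h20, h21, h22, h23]
    · simp [SHADCN_COMPONENT_MAP, PySem.Dict.ofList, PySem.Dict.update,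
        PySem.Dict.contains_insert, PySem.Dict.contains_empty, h0, h1, h2, h3, h4, h5, h6, h7, h8, h9, h10, h11, h12, h13, h14, h15, h16, h17, h18, h19, h20, h21, h22, h23, h24, h25, h26, h27, h28, h29, h30]

-- the grouping dict of A: its value at any path is the filtered input
theorem pv_getD_group (shadcn_names : List String)
    (path_of : String → String) (p : String) :
    (shadcn_names.foldl (fun d name => d.modify (path_of name) [] (fun v => v ++ [name]))
        (PySem.Dict.empty : PySem.Dict String (List String))).getD p []
      = shadcn_names.filter (fun n => path_of n == p) := by
  have h := PySem.Dict.getD_foldl_modify_append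
      (l := shadcn_names.map (fun n => (path_of n, n)))
      (d := (PySem.Dict.empty : PySem.Dict String (List String))) (c := p)
  rw [List.foldl_map] at h
  simpa [PySem.Dict.getD_empty, List.filter_map, List.map_map, Function.comp_def] using h

-- the keys of the grouping dict are the distinct paths, in first-occurrence order
theorem pv_keys_group (shadcn_names : List String) (path_of : String → String) :
    (shadcn_names.foldl (fun d name => d.modify (path_of name) [] (fun v => v ++ [name]))
        (PySem.Dict.empty : PySem.Dict String (List String))).keys
      = PySem.Set.ofList (shadcn_names.map path_of) := by
  have h := PySem.Dict.keys_foldl_modify_key (l := shadcn_names) (key := path_of)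
      (d0 := ([] : List String)) (f := fun _ name => (fun v => v ++ [name]))
      (d := (PySem.Dict.empty : PySem.Dict String (List String)))
  simpa [PySem.Dict.keys_empty, PySem.Set.update, PySem.Set.ofList_eq_foldl] using h

-- the sorted items of the grouping dict, named explicitly
theorem pv_sorted_items (shadcn_names : List String) (path_of : String → String) :
    PySem.List.sorted
      (shadcn_names.foldl (fun d name => d.modify (path_of name) [] (fun v => v ++ [name]))
          (PySem.Dict.empty : PySem.Dict String (List String))).items
      (fun p => p.1) false
    = (PySem.List.sorted (PySem.Set.ofList (shadcn_names.map path_of)) (fun x => x) false).map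
        (fun p => (p, shadcn_names.filter (fun n => path_of n == p))) := by
  set d := shadcn_names.foldl (fun d name => d.modify (path_of name) [] (fun v => v ++ [name]))
      (PySem.Dict.empty : PySem.Dict String (List String)) with hd
  have hkeys : d.keys = PySem.Set.ofList (shadcn_names.map path_of) := pv_keys_group _ _
  have hnodup : d.keys.Nodup := hkeys ▸ PySem.Set.nodup_ofList _
  refine PySem.List.sorted_eq_of_perm_of_pairwise_lt _ _ _ ?_ ?_
  · have hitems : d.items = d.keys.map (fun k => (k, d.getD k [])) :=
      PySem.Dict.items_eq_map_keys d hnodup []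
    have hperm : (PySem.List.sorted (PySem.Set.ofList (shadcn_names.map path_of))
        (fun x => x) false).Perm d.keys := by
      rw [hkeys]; exact PySem.List.sorted_perm _ _ _
    have := hperm.map (fun k => (k, d.getD k []))
    rw [← hitems] at this
    have heq : (PySem.List.sorted (PySem.Set.ofList (shadcn_names.map path_of)) (fun x => x) false).map
            (fun p => (p, shadcn_names.filter (fun n => path_of n == p)))
        = (PySem.List.sorted (PySem.Set.ofList (shadcn_names.map path_of)) (fun x => x) false).map
            (fun k => (k, d.getD k [])) :=
      List.map_congr_left (fun k _ => by rw [hd, pv_getD_group])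
    rw [heq]
    exact this
  · have := PySem.List.sorted_ofList_pairwise_lt (shadcn_names.map path_of)
    exact List.pairwise_map.mpr (by simpa using this)

-- A's value, in closed form: one line per sorted distinct path, names sorted per path
theorem pv_A_closed (shadcn_names : List String) :
    build_shadcn_import_lines shadcn_names
      = (PySem.List.sorted (PySem.Set.ofList (shadcn_names.map pv_path_of_alt)) (fun x => x) false).map
          (fun p => pv_mkLine p (PySem.List.sorted
            (shadcn_names.filter (fun n => pv_path_of_alt n == p)) (fun x => x) false)) := by
  unfold build_shadcn_import_lines
  simp only [pv_path_of_eq]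
  rw [PySem.List.foldl_append_singleton_eq_map, List.nil_append,
      pv_sorted_items shadcn_names pv_path_of_alt, List.map_map]
  simp [Function.comp_def, pv_mkLine]

-- Python's tuple sort is a sort by the lexicographic order on the pair
theorem pv_lex_bool (a b : String × String) :
    (decide (a.1 < b.1) || (!decide (b.1 < a.1) && decide (a.2 < b.2)))
      = decide (toLex a < toLex b) := by
  by_cases h1 : a.1 < b.1
  · simp [h1, Prod.Lex.toLex_lt_toLex]
  by_cases h2 : b.1 < a.1
  · simp [h1, h2, Prod.Lex.toLex_lt_toLex]
    intro h; exact absurd (h ▸ h2) (lt_irrefl _)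
  · have he : a.1 = b.1 := le_antisymm (not_lt.mp h2) (not_lt.mp h1)
    simp [Prod.Lex.toLex_lt_toLex, he]

theorem pv_sorted2_eq_lex (xs : List (String × String)) :
    PySem.List.sorted2 xs Prod.fst Prod.snd false
      = PySem.List.sorted (α := Lex (String × String)) xs (fun x => x) false := by
  show List.foldl (fun acc x => PySem.List.insertBy
      (fun a b => decide (a.1 < b.1) || (!decide (b.1 < a.1) && decide (a.2 < b.2))) x acc) [] xs
    = List.foldl (fun acc x => PySem.List.insertBy
      (fun a b : Lex (String × String) => decide (a < b)) x acc) [] xs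
  have hfun : (fun (a b : String × String) => decide (a.1 < b.1) || (!decide (b.1 < a.1) && decide (a.2 < b.2)))
      = (fun a b : Lex (String × String) => decide (a < b)) := by
    funext a b; exact pv_lex_bool (ofLex a) (ofLex b)
  exact congrArg (fun f => List.foldl (fun acc x => PySem.List.insertBy f x acc) [] xs) hfun

-- NAME the result of the tuple sort: any lex-sorted rearrangement
theorem pv_sorted2_eq_of_perm_of_pairwise (xs ys : List (String × String)) (hperm : ys.Perm xs)
    (hpw : ys.Pairwise (fun a b => toLex a ≤ toLex b)) :
    PySem.List.sorted2 xs Prod.fst Prod.snd false = ys := by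
  rw [pv_sorted2_eq_lex]
  exact PySem.List.sorted_id_eq_of_perm_of_pairwise (κ := Lex (String × String)) xs ys hperm hpw

-- fibers partition: the filters over the distinct paths are a permutation of names
theorem pv_fiber_perm (path_of : String → String) (paths names : List String)
    (hnd : paths.Nodup) (hmem : ∀ n ∈ names, path_of n ∈ paths) :
    (paths.flatMap (fun p => names.filter (fun n => path_of n == p))).Perm names := by
  induction paths generalizing names with
  | nil => cases names with
    | nil => simp
    | cons a t => exact absurd (hmem a (by simp)) (by simp)
  | cons p rest ih =>
    rw [List.flatMap_cons]
    rcases List.nodup_cons.mp hnd with ⟨hp, hndr⟩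
    have hflat : rest.flatMap (fun q => names.filter (fun n => path_of n == q))
        = rest.flatMap (fun q => (names.filter (fun n => !(path_of n == p))).filter (fun n => path_of n == q)) := by
      apply List.flatMap_congr
      intro q hq
      rw [List.filter_filter]
      symm
      apply List.filter_congr
      intro n _
      by_cases h : path_of n = q
      · simp [h]; intro he; exact hp (he ▸ hq)
      · simp [h]
    rw [hflat]
    have hih := ih (names.filter (fun n => !(path_of n == p))) hndr (by
      intro n hn
      rcases List.mem_filter.mp hn with ⟨hn1, hn2⟩
      rcases List.mem_cons.mp (hmem n hn1) with h | h
      · simp [h] at hn2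
      · exact h)
    exact (List.Perm.append_left _ hih).trans (List.filter_append_perm _ names)

theorem pv_takeWhile_nil (pred : String × String → Bool) (l : List (String × String))
    (h : ∀ x ∈ l, pred x = false) : l.takeWhile pred = [] := by
  cases l with
  | nil => rfl
  | cons a t => simp [h a (by simp)]

theorem pv_dropWhile_self (pred : String × String → Bool) (l : List (String × String))
    (h : ∀ x ∈ l, pred x = false) : l.dropWhile pred = l := by
  cases l with
  | nil => rfl
  | cons a t => simp [h a (by simp)]

-- groups listed by strictly increasing path, names sorted inside: lex-sorted pairs
theorem pv_flat_pairwise (paths : List String) (g : String → List String)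
    (hpaths : paths.Pairwise (· < ·)) (hg : ∀ p, (g p).Pairwise (· ≤ ·)) :
    (paths.flatMap (fun p => (g p).map (fun n => (p, n)))).Pairwise
      (fun a b => toLex a ≤ toLex b) := by
  induction paths with
  | nil => simp
  | cons p rest ih =>
    rw [List.flatMap_cons]
    rcases List.pairwise_cons.mp hpaths with ⟨hlt, htail⟩
    apply List.pairwise_append.mpr
    refine ⟨?_, ih htail, ?_⟩
    · apply List.pairwise_map.mpr
      apply List.Pairwise.imp ?_ (hg p)
      intro a b hab
      rw [Prod.Lex.toLex_le_toLex]
      exact Or.inr ⟨rfl, hab⟩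
    · intro a ha b hb
      rcases List.mem_flatMap.mp hb with ⟨q, hq, hbq⟩
      rcases List.mem_map.mp hbq with ⟨n, _, rfl⟩
      rcases List.mem_map.mp ha with ⟨m, _, rfl⟩
      rw [Prod.Lex.toLex_le_toLex]
      exact Or.inl (hlt q hq)

-- the grouping scan over a concatenation of nonempty groups with strictly
-- increasing paths emits exactly one line per group
theorem pv_groupLines_flat (paths : List String) (g : String → List String)
    (hpaths : paths.Pairwise (· < ·)) (hne : ∀ p ∈ paths, g p ≠ []) :
    pvGroupLines (paths.flatMap (fun p => (g p).map (fun n => (p, n))))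
      = paths.map (fun p => pv_mkLine p (g p)) := by
  induction paths with
  | nil => simp [pvGroupLines]
  | cons p rest ih =>
    rcases List.pairwise_cons.mp hpaths with ⟨hlt, htail⟩
    obtain ⟨n0, t, hgp⟩ : ∃ n0 t, g p = n0 :: t := by
      cases h : g p with
      | nil => exact absurd h (hne p (by simp))
      | cons a b => exact ⟨a, b, rfl⟩
    have hall : ∀ x ∈ t.map (fun n => (p, n)), (fun q => q.1 == p) x = true := by
      intro x hx; rcases List.mem_map.mp hx with ⟨n, _, rfl⟩; simp
    have hflatfalse : ∀ x ∈ rest.flatMap (fun q => (g q).map (fun n => (q, n))),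
        (fun q => q.1 == p) x = false := by
      intro x hx
      rcases List.mem_flatMap.mp hx with ⟨q, hq, hxq⟩
      rcases List.mem_map.mp hxq with ⟨n, _, rfl⟩
      simp
      exact ne_of_gt (hlt q hq)
    rw [List.flatMap_cons, hgp, List.map_cons, List.cons_append, pvGroupLines]
    rw [List.takeWhile_append_of_pos hall, List.dropWhile_append_of_pos hall,
        pv_takeWhile_nil _ _ hflatfalse, pv_dropWhile_self _ _ hflatfalse,
        List.append_nil, List.map_map]
    rw [ih htail (fun q hq => hne q (by simp [hq]))]
    simp [hgp]

-- B's value, in the same closed form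
theorem pv_B_closed (shadcn_names : List String) :
    build_shadcn_import_lines_alt shadcn_names
      = (PySem.List.sorted (PySem.Set.ofList (shadcn_names.map pv_path_of_alt)) (fun x => x) false).map
          (fun p => pv_mkLine p (PySem.List.sorted
            (shadcn_names.filter (fun n => pv_path_of_alt n == p)) (fun x => x) false)) := by
  unfold build_shadcn_import_lines_alt
  set paths := PySem.List.sorted (PySem.Set.ofList (shadcn_names.map pv_path_of_alt)) (fun x => x) false with hpaths
  set g := fun p => PySem.List.sorted (shadcn_names.filter (fun n => pv_path_of_alt n == p)) (fun x => x) false with hg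
  have hpathslt : paths.Pairwise (· < ·) := by
    have := PySem.List.sorted_ofList_pairwise_lt (shadcn_names.map pv_path_of_alt)
    simpa [hpaths] using this
  have hpathsnd : paths.Nodup := hpathslt.imp (fun h => ne_of_lt h)
  have hpathsmem : ∀ n ∈ shadcn_names, pv_path_of_alt n ∈ paths := by
    intro n hn
    rw [hpaths, PySem.List.mem_sorted, PySem.Set.mem_ofList]
    exact List.mem_map_of_mem hn
  have hperm : (paths.flatMap (fun p => (g p).map (fun n => (p, n)))).Perm
      (shadcn_names.map (fun name => (pv_path_of_alt name, name))) := by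
    have h1 : (paths.flatMap (fun p => (g p).map (fun n => (p, n)))).Perm
        (paths.flatMap (fun p => (shadcn_names.filter (fun n => pv_path_of_alt n == p)).map (fun n => (p, n)))) :=
      List.Perm.flatMap_left paths (fun p _ => List.Perm.map _ (PySem.List.sorted_perm _ _ _))
    have h2 : paths.flatMap (fun p => (shadcn_names.filter (fun n => pv_path_of_alt n == p)).map (fun n => (p, n)))
        = (paths.flatMap (fun p => shadcn_names.filter (fun n => pv_path_of_alt n == p))).map
            (fun n => (pv_path_of_alt n, n)) := by
      rw [List.map_flatMap]
      apply List.flatMap_congr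
      intro p _
      apply List.map_congr_left
      intro n hn
      have := (List.mem_filter.mp hn).2
      simp only [beq_iff_eq] at this
      rw [this]
    have h3 := (pv_fiber_perm pv_path_of_alt paths shadcn_names hpathsnd hpathsmem).map
        (fun n => (pv_path_of_alt n, n))
    exact h1.trans (h2 ▸ h3)
  have hpw : (paths.flatMap (fun p => (g p).map (fun n => (p, n)))).Pairwise
      (fun a b => toLex a ≤ toLex b) := by
    apply pv_flat_pairwise paths g hpathslt
    intro p
    have := PySem.List.sorted_pairwise (shadcn_names.filter (fun n => pv_path_of_alt n == p)) (fun x => x)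
    simpa [hg] using this
  rw [pv_sorted2_eq_of_perm_of_pairwise _ _ hperm hpw]
  apply pv_groupLines_flat paths g hpathslt
  intro p hp
  rw [hg, Ne, PySem.List.sorted_eq_nil_iff]
  rw [hpaths, PySem.List.mem_sorted] at hp
  rcases List.mem_map.mp ((PySem.Set.mem_ofList _ _).mp hp) with ⟨n, hn, rfl⟩
  intro hnil
  have hmemf : n ∈ shadcn_names.filter (fun m => pv_path_of_alt m == pv_path_of_alt n) :=
    List.mem_filter.mpr ⟨hn, by simp⟩
  rw [hnil] at hmemf
  exact absurd hmemf List.not_mem_nil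

-- ===== VERDICT (by name: the statement is the Claim_ definition above) =====
theorem build_shadcn_import_lines_spec : Claim_equal_build_shadcn_import_lines := by
  intro shadcn_names _
  show build_shadcn_import_lines shadcn_names = build_shadcn_import_lines_alt shadcn_names
  rw [pv_A_closed, pv_B_closed]
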